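/-
  jsmn_s.bin: what the three regions of `jsmn_parse` that look into the token array share (Prog/Jsmn/S/ParseFinal.lean, ParseComma.lean,
  ParseClose.lean) — the S twin of Prog/Jsmn/D/ScanLemmas.lean (20-byte tokens, the `parent` field at +16).
    * the model side: `scanOpen` one step at a time; `(int)(toknext - 1)`;
    * memory ↔ model: "the token is open" as the machine tests it (raw start ≠ FFFFFFFFH, raw end = FFFFFFFFH); the address of `tokens[i]`
      as the machine computes it (`cdqe / movsxd ; lea rax,[rax+rax*4] ; lea rdx,[r13+rax*4]`);
    * `FrameCore` after one store inside the token array, and after the two stores of the closing bracket.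
-/
import Prog.Jsmn.S.ParseLemmas

namespace X86
namespace J6
namespace S
open X86.User (CodeAt RegsKept Span FlagsOK Layout toNat_add_ofNat toNat_ofNat_lt' add_ofNat_add)
open Jsmn

set_option maxRecDepth 100000
set_option maxHeartbeats 4000000
set_option linter.unusedSimpArgs false
set_option linter.unusedVariables false

/-! ### The model side -/

/-- `start != -1 && end == -1` on the raw 32-bit patterns. -/
theorem isOpen_raw {t : Token} {rs re : Nat} (hs : Holds32 rs t.start) (he : Holds32 re t.«end») :
    t.isOpen = true ↔ rs ≠ 4294967295 ∧ re = 4294967295 := by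
  obtain ⟨h1, h2, h3⟩ := hs
  obtain ⟨h4, h5, h6⟩ := he
  unfold u32 at h1 h4
  simp only [Token.isOpen, Bool.and_eq_true, bne_iff_ne, ne_eq, beq_iff_eq]
  omega

/-- `x == -1` on the raw 32-bit pattern of an `int`. -/
theorem neg1_raw {x : Int} {r : Nat} (h : Holds32 r x) : x = -1 ↔ r = 4294967295 := by
  obtain ⟨h1, h2, h3⟩ := h
  unfold u32 at h1
  omega

theorem scanOpen_succ_open {ts : Tokens} {j : Nat} (h : (ts.getD j default).isOpen = true) : scanOpen ts (j + 1) = some j := by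
  simp only [scanOpen]; rw [if_pos h]

theorem scanOpen_succ_closed {ts : Tokens} {j : Nat} (h : ¬ (ts.getD j default).isOpen = true) : scanOpen ts (j + 1) = scanOpen ts j := by
  simp only [scanOpen]; rw [if_neg h]

/-- `(int)(toknext - 1)` for a `toknext` that fits the array (`Inv`): no wrap. -/
theorem i32_pred {k : Nat} (h : k ≤ 2147483648) : i32 ((k : Int) - 1) = (k : Int) - 1 := by unfold i32; omega

/-- The 32-bit pattern of `j - 1` for `j ≥ 1`. -/
theorem u32_pred_succ (j : Nat) (h : j < 4294967296) : u32 (((j + 1 : Nat) : Int) - 1) = j := by unfold u32; omega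

theorem u32_pred_zero : u32 (((0 : Nat) : Int) - 1) = 4294967295 := by unfold u32; omega

/-- The 32-bit pattern of a natural number that fits. -/
theorem u32_nat (k : Nat) (h : k < 4294967296) : u32 (k : Int) = k := by unfold u32; omega

/-- `tokens[k]` for an `int` index that is a natural number. -/
theorem tokAt_nat (ts : Tokens) (k : Nat) : tokAt ts (k : Int) = ts.getD k default := by
  unfold tokAt; rw [if_neg (by omega), Int.toNat_natCast]

/-- `tokens[k] = f (tokens[k])` for an `int` index that is a natural number. -/
theorem tokUpd_nat (ts : Tokens) (k : Nat) (f : Token → Token) : tokUpd ts (k : Int) f = ts.set k (f (ts.getD k default)) := by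
  unfold tokUpd; rw [if_neg (by omega), Int.toNat_natCast, tokAt_nat]

/-! ### The address of `tokens[i]` -/

/-- With 20-byte tokens. -/
theorem tokAddr20 (tb : Word) (i : Nat) : tokAddr Config.strictLinks tb i = tb + UInt64.ofNat (20 * i) := by
  unfold tokAddr; rw [tokSize_strictLinks]

/-! ### `FrameCore` at a later view -/

variable {c : PCtx} {n : User.Layout} {v0 v v' : User.State} {p p' : Parser} {ts ts' : Tokens}

/-- With a token array, its size in bytes is `20 * num_tokens`. -/
theorem FrameCore.tlen_some (h : FrameCore c n v0 v p (some ts)) : toksBytes Config.strictLinks c.numTokens c.toks0 = 20 * c.numTokens := by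
  cases h0 : c.toks0 with
  | none => exact absurd (h.null.mpr h0) (by simp)
  | some _ => rfl

/-- `FrameCore` after ONE 4-byte store inside the token array: everything but the tokens is carried over (the new `TokensAt` is proved at the
place of use, with `TokensAt.update`). -/
theorem FrameCore.store_token {a : Word} {x : Nat}
    (h : FrameCore c n v0 v p (some ts)) (hm : v'.mem = v.mem.writeLE a 4 x) (hk : RegsKept (.r12 :: scratch) v v')
    (ha : c.tb.toNat ≤ a.toNat ∧ a.toNat + 4 ≤ c.tb.toNat + 20 * c.numTokens)
    (hl : ts'.length = c.numTokens) (ht : TokensAt Config.strictLinks v'.mem c.tb ts') : FrameCore c n v0 v' p (some ts') := by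
  have htl := h.tlen_some
  have htb := h.toksArg.1
  obtain ⟨ha1, ha2⟩ := ha
  have he := h.entry.pre.env
  have hc := h.entry.pre.call
  have h_same := h.same
  have hpa := h.parser
  have hW := h.entry.pre.toksW
  v3_open he hc hW
  j6_bin
  unfold dataWins PCtx.tlen at h_same
  rw [htl] at hW_hi hW_img hW_stk he_parserToks he_jsToks h_same
  refine ⟨h.entry, ?_, ?_, ?_, ?_, ?_, ?_, ?_, ?_, ?_, ?_, ?_, ?_, ?_, ?_, ?_, ⟨htb, hl, ht⟩, ?_⟩
  · rw [hk .rsp rfl]; exact h.rsp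
  · rw [hk .rbp rfl]; exact h.rbp
  · rw [hk .r15 rfl]; exact h.r15
  · rw [hk .r14 rfl]; exact h.r14
  · rw [hk .r13 rfl]; exact h.r13
  · rw [hm]; v3_frame h.ntok
  · rw [hm]; v3_frame h.sv15
  · rw [hm]; v3_frame h.sv14
  · rw [hm]; v3_frame h.sv13
  · rw [hm]; v3_frame h.sv12
  · rw [hm]; v3_frame h.svbp
  · rw [hm]; v3_frame h.svbx
  · rw [hm]; v3_frame h.retA
  · rw [hm]; unfold dataWins PCtx.tlen; rw [htl]; v3_same
  · rw [hm]; v3_frame hpa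
  · have := h.null; simp only [reduceCtorEq, false_iff] at this ⊢; exact this

/-- `FrameCore` after the two stores of the closing bracket (`token->end = pos + 1 ; parser->toksuper = token->parent`): one inside the token
array, then one inside the parser struct. The new `ParserAt` and `TokensAt` are proved at the place of use. -/
theorem FrameCore.store_token_super {b : Word} {x y : Nat}
    (h : FrameCore c n v0 v p (some ts)) (hm : v'.mem = (v.mem.writeLE b 4 y).writeLE (c.pa + 8) 4 x) (hk : RegsKept (.r12 :: scratch) v v')
    (hb : c.tb.toNat ≤ b.toNat ∧ b.toNat + 4 ≤ c.tb.toNat + 20 * c.numTokens)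
    (hp : ParserAt v'.mem c.pa p') (hl : ts'.length = c.numTokens) (ht : TokensAt Config.strictLinks v'.mem c.tb ts') :
    FrameCore c n v0 v' p' (some ts') := by
  have htl := h.tlen_some
  have htb := h.toksArg.1
  obtain ⟨hb1, hb2⟩ := hb
  have he := h.entry.pre.env
  have hc := h.entry.pre.call
  have h_same := h.same
  have hW := h.entry.pre.toksW
  v3_open he hc hW
  j6_bin
  unfold dataWins PCtx.tlen at h_same
  rw [htl] at hW_hi hW_img hW_stk he_parserToks he_jsToks h_same
  refine ⟨h.entry, ?_, ?_, ?_, ?_, ?_, ?_, ?_, ?_, ?_, ?_, ?_, ?_, ?_, ?_, hp, ⟨htb, hl, ht⟩, ?_⟩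
  · rw [hk .rsp rfl]; exact h.rsp
  · rw [hk .rbp rfl]; exact h.rbp
  · rw [hk .r15 rfl]; exact h.r15
  · rw [hk .r14 rfl]; exact h.r14
  · rw [hk .r13 rfl]; exact h.r13
  · rw [hm]; v3_frame h.ntok
  · rw [hm]; v3_frame h.sv15
  · rw [hm]; v3_frame h.sv14
  · rw [hm]; v3_frame h.sv13
  · rw [hm]; v3_frame h.sv12
  · rw [hm]; v3_frame h.svbp
  · rw [hm]; v3_frame h.svbx
  · rw [hm]; v3_frame h.retA
  · rw [hm]; unfold dataWins PCtx.tlen; rw [htl]; v3_same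
  · have := h.null; simp only [reduceCtorEq, false_iff] at this ⊢; exact this

end S
end J6
end X86
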